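-- pv_equiv track=rewrite | github.com/likith-gullapudi/DSA | icpsc/week-1/number_theory/level_1/D - Coprime 2.py | find_coprimes
-- ===== SOURCE A (Python) =====
-- def find_coprimes(N, M, A):
--     MAX = 10**5
--     # Step 1: Find all unique prime factors from A
--     prime_factors = set()
--
--     def prime_factorization(x):
--         factors = set()
--         d = 2
--         while d * d <= x:
--             while x % d == 0:
--                 factors.add(d)
--                 x //= d
--             d += 1 if d == 2 else 2
--         if x > 1:
--             factors.add(x)
--         return factors
--
--     for num in A:
--         prime_factors.update(prime_factorization(num))
--
--     # Step 2: Use sieve to mark multiples of these prime factors up to M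
--     sieve = [False] * (M + 1)
--     for p in prime_factors:
--         for multiple in range(p, M + 1, p):
--             sieve[multiple] = True
--
--     # Step 3: Collect numbers that are not marked in sieve (gcd=1 for all A[i])
--     result = [k for k in range(1, M + 1) if not sieve[k]]
--
--     return result
-- ===== SOURCE B (Python) =====
-- def find_coprimes(N, M, A):
--     # Numbers 1..M that are coprime to every element of A.  Elements <= 1
--     # contribute no prime factors, so only elements > 1 constrain the result.
--     def gcd(x, y):
--         while y:
--             x, y = y, x % y
--         return x
--
--     constraints = [a for a in A if a > 1]
--     return [k for k in range(1, M + 1) if all(gcd(k, a) == 1 for a in constraints)]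
-- ===== Notes on version B (the rewrite author's own statement) =====
-- stated objective: simpler
-- what changed: Dropped the trial-division prime factorization and the boolean multiples sieve entirely; B filters 1..M by a direct Euclidean-gcd coprimality test against the elements of A greater than 1 (the only ones whose prime factors A's factorizer collects).
import Mathlib
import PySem

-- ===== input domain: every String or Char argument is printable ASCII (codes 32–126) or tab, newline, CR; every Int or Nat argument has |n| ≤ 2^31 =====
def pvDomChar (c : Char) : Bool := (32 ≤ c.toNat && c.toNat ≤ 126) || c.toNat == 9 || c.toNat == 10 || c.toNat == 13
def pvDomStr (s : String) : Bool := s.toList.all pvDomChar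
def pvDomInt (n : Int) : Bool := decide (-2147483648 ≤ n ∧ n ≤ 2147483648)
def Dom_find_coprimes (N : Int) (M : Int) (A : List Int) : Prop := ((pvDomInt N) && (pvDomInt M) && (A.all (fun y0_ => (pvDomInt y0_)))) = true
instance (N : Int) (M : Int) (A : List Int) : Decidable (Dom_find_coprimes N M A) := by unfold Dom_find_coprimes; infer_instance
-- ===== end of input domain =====

-- B replaces A's trial-division factor collection + boolean multiples sieve by a direct
-- gcd-coprimality filter over 1..M (objective: simpler).  Return-value equivalence only.

-- ===== PORT A =====

-- helper fact cited by the termination proofs of port A (the port cites it by name)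
theorem pvFloordiv_lt (x d : Int) (hx : 1 ≤ x) (hd : 2 ≤ d)
    (h : PySem.Int.mod x d = 0) :
    1 ≤ PySem.Int.floordiv x d ∧ PySem.Int.floordiv x d < x := by
  have hdvd : d ∣ x := (PySem.Int.mod_eq_zero_iff_dvd x d).1 h
  have hdx : d ≤ x := Int.le_of_dvd hx hdvd
  constructor
  · exact (PySem.Int.le_floordiv_iff_mul_le (a := x) (b := d) (q := 1) (by omega)).2 (by omega)
  · refine (PySem.Int.floordiv_lt_iff_lt_mul (a := x) (b := d) (q := x) (by omega)).2 ?_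
    have h2 : x * 2 ≤ x * d := mul_le_mul_of_nonneg_left hd (by omega)
    linarith

theorem pvInnerDec (x d : Int) (hx : 1 ≤ x) (hd : 2 ≤ d) (h : PySem.Int.mod x d = 0) :
    (PySem.Int.floordiv x d).toNat < x.toNat := by
  have := pvFloordiv_lt x d hx hd h
  omega

-- inner 'while x % d == 0' loop of A's prime_factorization; the two proof arguments
-- only justify termination, the computation is Python's
def pvFacInner (x d : Int) (factors : PySem.Set Int) (hx : 1 ≤ x) (hd : 2 ≤ d) :
    Int × PySem.Set Int :=
  if h : PySem.Int.mod x d = 0 then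
    pvFacInner (PySem.Int.floordiv x d) d (PySem.Set.add factors d)
      (pvFloordiv_lt x d hx hd h).1 hd
  else (x, factors)
termination_by x.toNat
decreasing_by exact pvInnerDec x d hx hd h

-- facts about the inner loop's remaining x, cited by pvFacOuter's termination proof
theorem pvFacInner_fst (x d : Int) (f : PySem.Set Int) (hx : 1 ≤ x) (hd : 2 ≤ d) :
    1 ≤ (pvFacInner x d f hx hd).1 ∧ (pvFacInner x d f hx hd).1 ≤ x ∧
      (pvFacInner x d f hx hd).1 ∣ x := by
  refine pvFacInner.induct d hd
    (motive := fun x f hx =>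
      1 ≤ (pvFacInner x d f hx hd).1 ∧ (pvFacInner x d f hx hd).1 ≤ x ∧
        (pvFacInner x d f hx hd).1 ∣ x) ?_ ?_ x f hx
  · intro x f hx h ih
    rw [pvFacInner]; simp only [dif_pos h]
    have hlt := pvFloordiv_lt x d hx hd h
    refine ⟨ih.1, le_trans ih.2.1 (le_of_lt hlt.2), ?_⟩
    have hfd : PySem.Int.floordiv x d ∣ x := by
      refine ⟨d, ?_⟩
      have h2 := PySem.Int.floordiv_mul_add_mod x d
      rw [h] at h2; omega
    exact dvd_trans ih.2.2 hfd
  · intro x f hx h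
    rw [pvFacInner]; simp only [dif_neg h]
    exact ⟨hx, le_refl x, dvd_refl x⟩

-- more termination facts for port A, cited by name in pvFacOuter
theorem pvSqOne (x d : Int) (hd : 2 ≤ d) (h : d * d ≤ x) : 1 ≤ x := by
  have h1 : (1:Int) * 1 ≤ d * d := mul_le_mul (by omega) (by omega) (by omega) (by omega)
  linarith

theorem pvNextGe (d : Int) (hd : 2 ≤ d) : 2 ≤ (if d = 2 then d + 1 else d + 2) := by
  split <;> omega

theorem pvToNatDec (a x d e : Int) (h1 : a ≤ x) (h2 : d ≤ x) (h4 : 2 ≤ d)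
    (h5 : d + 1 ≤ e) (h6 : e ≤ d + 2) : (a + 3 - e).toNat < (x + 3 - d).toNat := by
  omega

theorem pvOuterDec (x d : Int) (f : PySem.Set Int) (hd : 2 ≤ d) (h : d * d ≤ x) :
    ((pvFacInner x d f (pvSqOne x d hd h) hd).1 + 3 - (if d = 2 then d + 1 else d + 2)).toNat
      < (x + 3 - d).toNat := by
  have ha1 : (pvFacInner x d f (pvSqOne x d hd h) hd).1 ≤ x :=
    (pvFacInner_fst x d f (pvSqOne x d hd h) hd).2.1
  have hdd : d * 1 ≤ d * d := mul_le_mul_of_nonneg_left (by omega) (by omega)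
  have hdx : d ≤ x := by linarith
  refine pvToNatDec _ x d _ ha1 hdx hd ?_ ?_ <;> split <;> omega

-- outer 'while d * d <= x' loop of A's prime_factorization
def pvFacOuter (x d : Int) (factors : PySem.Set Int) (hd : 2 ≤ d) : PySem.Set Int :=
  if h : d * d ≤ x then
    let p := pvFacInner x d factors (pvSqOne x d hd h) hd
    pvFacOuter p.1 (if d = 2 then d + 1 else d + 2) p.2 (pvNextGe d hd)
  else if 1 < x then PySem.Set.add factors x else factors
termination_by (x + 3 - d).toNat
decreasing_by exact pvOuterDec x d factors hd h

theorem pvTwoLe : (2:Int) ≤ 2 := le_refl 2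

def primeFactorization (x : Int) : PySem.Set Int :=
  pvFacOuter x 2 PySem.Set.empty pvTwoLe

def find_coprimes (N : Int) (M : Int) (A : List Int) : List Int :=
  let _MAX : Int := 10 ^ 5
  -- Step 1: prime_factors.update(prime_factorization(num)) for num in A
  let primeFactors : PySem.Set Int :=
    A.foldl (fun s num => PySem.Set.update s (primeFactorization num)) PySem.Set.empty
  -- Step 2: sieve = [False] * (M + 1), then mark multiples (the marking result is
  -- independent of the set's iteration order); sieve[multiple] is always in range,
  -- where pySetD/pyGetD agree exactly with Python's indexing
  let sieve : List Bool :=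
    primeFactors.foldl
      (fun sv p =>
        (PySem.List.pyRange p (M + 1) p).foldl
          (fun sv m => PySem.List.pySetD sv m true) sv)
      (List.replicate (M + 1).toNat false)
  -- Step 3
  (PySem.List.pyRange 1 (M + 1) 1).filter (fun k => !(PySem.List.pyGetD sieve k false))

-- ===== PORT B =====

-- helper fact cited by the termination proof of port B's gcd
theorem pvModAbs_lt (x y : Int) (h : ¬ y = 0) :
    (PySem.Int.mod x y).natAbs < y.natAbs := by
  rcases lt_or_gt_of_ne h with hy | hy
  · have := PySem.Int.mod_neg_bounds x (b := y) hy; omega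
  · have h1 := PySem.Int.mod_nonneg x (b := y) hy
    have h2 := PySem.Int.mod_lt x (b := y) hy
    omega

-- B's Euclidean gcd: 'while y: x, y = y, x % y'
def pvGcd (x y : Int) : Int :=
  if h : y = 0 then x else pvGcd y (PySem.Int.mod x y)
termination_by y.natAbs
decreasing_by exact pvModAbs_lt x y h

def find_coprimes_alt (N : Int) (M : Int) (A : List Int) : List Int :=
  let constraints := A.filter (fun a => 1 < a)
  (PySem.List.pyRange 1 (M + 1) 1).filter
    (fun k => constraints.all (fun a => pvGcd k a == 1))

-- ===== PRECONDITION & SPEC =====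
def Spec_find_coprimes (N : Int) (M : Int) (A : List Int) (out : List Int) : Prop := out = find_coprimes_alt N M A
instance (N : Int) (M : Int) (A : List Int) (out : List Int) : Decidable (Spec_find_coprimes N M A out) := by unfold Spec_find_coprimes; infer_instance

-- ===== CLAIM (what is proved, stated in full; the proofs are below) =====
def Claim_equal_find_coprimes : Prop := ∀ (N : Int) (M : Int) (A : List Int), Dom_find_coprimes N M A → Spec_find_coprimes N M A (find_coprimes N M A)

-- ===== LEMMAS AND PROOFS =====

theorem pvFacInner_not_dvd (x d : Int) (f : PySem.Set Int) (hx : 1 ≤ x) (hd : 2 ≤ d) :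
    ¬ d ∣ (pvFacInner x d f hx hd).1 := by
  refine pvFacInner.induct d hd
    (motive := fun x f hx => ¬ d ∣ (pvFacInner x d f hx hd).1) ?_ ?_ x f hx
  · intro x f hx h ih
    rw [pvFacInner]; simp only [dif_pos h]
    exact ih
  · intro x f hx h
    rw [pvFacInner]; simp only [dif_neg h]
    exact fun hdvd => h ((PySem.Int.mod_eq_zero_iff_dvd x d).2 hdvd)

theorem pvFacInner_mem (x d : Int) (f : PySem.Set Int) (hx : 1 ≤ x) (hd : 2 ≤ d)
    (q : Int) :
    q ∈ (pvFacInner x d f hx hd).2 ↔ q ∈ f ∨ (q = d ∧ d ∣ x) := by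
  refine pvFacInner.induct d hd
    (motive := fun x f hx =>
      q ∈ (pvFacInner x d f hx hd).2 ↔ q ∈ f ∨ (q = d ∧ d ∣ x)) ?_ ?_ x f hx
  · intro x f hx h ih
    rw [pvFacInner]; simp only [dif_pos h]
    rw [ih, PySem.Set.mem_add]
    have hdvd : d ∣ x := (PySem.Int.mod_eq_zero_iff_dvd x d).1 h
    constructor
    · rintro ((hf | rfl) | ⟨rfl, _⟩)
      · exact Or.inl hf
      · exact Or.inr ⟨rfl, hdvd⟩
      · exact Or.inr ⟨rfl, hdvd⟩
    · rintro (hf | ⟨rfl, _⟩)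
      · exact Or.inl (Or.inl hf)
      · exact Or.inl (Or.inr rfl)
  · intro x f hx h
    rw [pvFacInner]; simp only [dif_neg h]
    have hnd : ¬ d ∣ x := fun hdvd => h ((PySem.Int.mod_eq_zero_iff_dvd x d).2 hdvd)
    simp [hnd]

theorem pvFacInner_prime_dvd (x d : Int) (f : PySem.Set Int) (hx : 1 ≤ x) (hd : 2 ≤ d)
    (q : Int) (hq : Prime q) (hq2 : 2 ≤ q) (hdvd : q ∣ x)
    (hinv : ∀ r, 2 ≤ r → Prime r → r ∣ x → d ≤ r) :
    q = d ∨ q ∣ (pvFacInner x d f hx hd).1 := by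
  refine pvFacInner.induct d hd
    (motive := fun x f hx =>
      q ∣ x → (∀ r, 2 ≤ r → Prime r → r ∣ x → d ≤ r) →
        q = d ∨ q ∣ (pvFacInner x d f hx hd).1) ?_ ?_ x f hx hdvd hinv
  · intro x f hx h ih hqx hinv
    rw [pvFacInner]; simp only [dif_pos h]
    have heq : x = d * PySem.Int.floordiv x d := by
      have h2 := PySem.Int.floordiv_mul_add_mod x d
      rw [h] at h2; linarith [h2]
    have hfd : PySem.Int.floordiv x d ∣ x := Dvd.intro_left d heq.symm
    rcases hq.dvd_mul.1 (heq ▸ hqx) with hqd | hqx'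
    · left
      have h1 : q ≤ d := Int.le_of_dvd (by omega) hqd
      have h2 : d ≤ q := hinv q hq2 hq (dvd_trans hqd (Dvd.intro _ heq.symm))
      omega
    · exact ih hqx' (fun r hr2 hrp hrd => hinv r hr2 hrp (dvd_trans hrd hfd))
  · intro x f hx h hqx _
    rw [pvFacInner]; simp only [dif_neg h]
    exact Or.inr hqx

theorem pvFacOuter_sound (x d : Int) (f : PySem.Set Int) (hd : 2 ≤ d) (q : Int)
    (hq : q ∈ pvFacOuter x d f hd) : q ∈ f ∨ (q ∣ x ∧ 2 ≤ q) := by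
  refine pvFacOuter.induct
    (motive := fun x d f hd =>
      q ∈ pvFacOuter x d f hd → q ∈ f ∨ (q ∣ x ∧ 2 ≤ q)) ?_ ?_ ?_ x d f hd hq
  · intro x d f hd h p ih hmem
    rw [pvFacOuter] at hmem; simp only [dif_pos h] at hmem
    have hfst := pvFacInner_fst x d f (by nlinarith) hd
    rcases ih hmem with hp2 | ⟨hdvd, hq2⟩
    · rcases (pvFacInner_mem x d f (by nlinarith) hd q).1 hp2 with hf | ⟨rfl, hdx⟩
      · exact Or.inl hf
      · exact Or.inr ⟨hdx, hd⟩
    · exact Or.inr ⟨dvd_trans hdvd hfst.2.2, hq2⟩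
  · intro x d f hd h h1 hmem
    rw [pvFacOuter] at hmem; simp only [dif_neg h, if_pos h1] at hmem
    rcases (PySem.Set.mem_add f x q).1 hmem with hf | rfl
    · exact Or.inl hf
    · exact Or.inr ⟨dvd_refl q, by omega⟩
  · intro x d f hd h h1 hmem
    rw [pvFacOuter] at hmem; simp only [dif_neg h, if_neg h1] at hmem
    exact Or.inl hmem

theorem pvFacOuter_mono (x d : Int) (f : PySem.Set Int) (hd : 2 ≤ d) (q : Int)
    (hq : q ∈ f) : q ∈ pvFacOuter x d f hd := by
  refine pvFacOuter.induct
    (motive := fun x d f hd => q ∈ f → q ∈ pvFacOuter x d f hd) ?_ ?_ ?_ x d f hd hq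
  · intro x d f hd h p ih hf
    rw [pvFacOuter]; simp only [dif_pos h]
    exact ih ((pvFacInner_mem x d f (by nlinarith) hd q).2 (Or.inl hf))
  · intro x d f hd h h1 hf
    rw [pvFacOuter]; simp only [dif_neg h, if_pos h1]
    exact (PySem.Set.mem_add f x q).2 (Or.inl hf)
  · intro x d f hd h h1 hf
    rw [pvFacOuter]; simp only [dif_neg h, if_neg h1]
    exact hf

theorem pvFacOuter_complete (x d : Int) (f : PySem.Set Int) (hd : 2 ≤ d)
    (hx : 1 ≤ x) (hodd : d = 2 ∨ d % 2 = 1)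
    (hinv : ∀ r, 2 ≤ r → Prime r → r ∣ x → d ≤ r)
    (q : Int) (hq : Prime q) (hq2 : 2 ≤ q) (hdvd : q ∣ x) :
    q ∈ pvFacOuter x d f hd := by
  refine pvFacOuter.induct
    (motive := fun x d f hd =>
      1 ≤ x → (d = 2 ∨ d % 2 = 1) → (∀ r, 2 ≤ r → Prime r → r ∣ x → d ≤ r) →
        q ∣ x → q ∈ pvFacOuter x d f hd) ?_ ?_ ?_ x d f hd hx hodd hinv hdvd
  · intro x d f hd h p ih hx hodd hinv hqx
    rw [pvFacOuter]; simp only [dif_pos h]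
    have hx1 : (1:Int) ≤ x := by nlinarith
    have hfst := pvFacInner_fst x d f (by nlinarith) hd
    have hnd := pvFacInner_not_dvd x d f (by nlinarith) hd
    rcases pvFacInner_prime_dvd x d f (by nlinarith) hd q hq hq2 hqx hinv with rfl | hqx'
    · -- q = d: the inner loop recorded d (d divides x), and membership is preserved
      apply pvFacOuter_mono
      exact (pvFacInner_mem _ _ _ _ _ _).2 (Or.inr ⟨rfl, hqx⟩)
    · -- q survives in the reduced x; apply the inductive hypothesis at the next d
      apply ih hfst.1
      · rcases hodd with rfl | hodd
        · simp
        · have : ¬ d = 2 := by omega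
          simp only [dif_neg this]
          right; omega
      · intro r hr2 hrp hrx'
        have hrx : r ∣ x := dvd_trans hrx' hfst.2.2
        have hdr : d ≤ r := hinv r hr2 hrp hrx
        have hrne : r ≠ d := by
          rintro rfl; exact hnd hrx'
        have hbound : d + 1 ≤ r := by omega
        split_ifs with hd2
        · omega
        · -- d odd, so d+1 is an even number ≥ 4 and cannot be the prime r
          have hdo : d % 2 = 1 := by rcases hodd with h' | h' <;> omega
          by_cases heq : r = d + 1
          · exfalso
            have h2r : (2:Int) ∣ r := by omega
            have hrprN : r.natAbs.Prime := Int.prime_iff_natAbs_prime.1 hrp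
            have h2rN : 2 ∣ r.natAbs := by
              have : ((2:Int)).natAbs ∣ r.natAbs := Int.natAbs_dvd_natAbs.2 h2r
              simpa using this
            rcases (Nat.Prime.eq_one_or_self_of_dvd hrprN 2 h2rN) with h' | h' <;> omega
          · omega
      · exact hqx'
  · intro x d f hd h h1 hx hodd hinv hqx
    rw [pvFacOuter]; simp only [dif_neg h, if_pos h1]
    -- q divides x, x has no prime factor below d, and x < d*d forces x = q
    have hxq : x = q := by
      rcases hqx with ⟨m, rfl⟩
      have hm1 : 1 ≤ m := by nlinarith
      rcases lt_or_eq_of_le hm1 with hm2 | rfl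
      · exfalso
        have hmna : m.natAbs ≠ 1 := by omega
        rcases Int.exists_prime_and_dvd hmna with ⟨r, hrp, hrm⟩
        have hrpos : (↑r.natAbs : Int) ∣ m := Int.natAbs_dvd.2 hrm
        have hrpN : r.natAbs.Prime := Int.prime_iff_natAbs_prime.1 hrp
        have hrpI : Prime ((r.natAbs : Int)) := Nat.prime_iff_prime_int.mp hrpN
        have hr2 : (2:Int) ≤ r.natAbs := by exact_mod_cast hrpN.two_le
        have hrx : (↑r.natAbs : Int) ∣ q * m := Dvd.dvd.mul_left hrpos q
        have hdr : d ≤ r.natAbs := hinv _ hr2 hrpI hrx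
        have hdq : d ≤ q := hinv q hq2 hq (Dvd.intro m rfl)
        have hrm2 : (↑r.natAbs : Int) ≤ m := Int.le_of_dvd (by omega) hrpos
        nlinarith
      · simp
    rw [hxq]
    exact (PySem.Set.mem_add f q q).2 (Or.inr rfl)
  · intro x d f hd h h1 hx hodd hinv hqx
    exfalso
    have hxq : q ≤ x := Int.le_of_dvd (by omega) hqx
    omega

theorem primeFactorization_sound (a q : Int) (hq : q ∈ primeFactorization a) :
    q ∣ a ∧ 2 ≤ q := by
  rcases pvFacOuter_sound a 2 PySem.Set.empty (by norm_num) q hq with hf | h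
  · simp [PySem.Set.empty] at hf
  · exact h

theorem primeFactorization_complete (a q : Int) (ha : 2 ≤ a)
    (hq : Prime q) (hq2 : 2 ≤ q) (hdvd : q ∣ a) : q ∈ primeFactorization a := by
  exact pvFacOuter_complete a 2 PySem.Set.empty (by norm_num) (by omega) (Or.inl rfl)
    (fun r hr2 _ _ => hr2) q hq hq2 hdvd

theorem primeFactorization_small (a : Int) (ha : a ≤ 1) : primeFactorization a = [] := by
  have h2 : ¬ 1 < a := by omega
  rw [primeFactorization, pvFacOuter, dif_neg (by omega : ¬ (2:Int) * 2 ≤ a), if_neg h2]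
  rfl

theorem pvGcd_eq_gcd (x y : Int) (hx : 0 ≤ x) (hy : 0 ≤ y) :
    pvGcd x y = Int.gcd x y := by
  refine pvGcd.induct (motive := fun x y => 0 ≤ x → 0 ≤ y → pvGcd x y = Int.gcd x y)
    ?_ ?_ x y hx hy
  · intro x hx hy
    rw [pvGcd, dif_pos rfl, Int.gcd_zero_right]
    exact (Int.natAbs_of_nonneg hx).symm
  · intro x y h ih hx hy
    rw [pvGcd, dif_neg h]
    have hypos : 0 < y := by omega
    have hm : PySem.Int.mod x y = x % y := PySem.Int.mod_eq_emod_of_pos (a := x) hypos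
    rw [hm] at ih ⊢
    rw [ih hy (Int.emod_nonneg x (by omega))]
    rw [Int.gcd_comm y (x % y), Int.gcd_emod x y]

theorem pvCoprime_iff (k a : Int) (hk : 1 ≤ k) :
    (∀ p ∈ primeFactorization a, ¬ p ∣ k) ↔ (1 < a → Int.gcd k a = 1) := by
  by_cases ha : a ≤ 1
  · rw [primeFactorization_small a ha]
    simp
    omega
  · replace ha : 1 < a := by omega
    constructor
    · intro h _
      by_contra hg
      have hgna : ((Int.gcd k a : Int)).natAbs ≠ 1 := by
        simpa using hg
      rcases Int.exists_prime_and_dvd hgna with ⟨r, hrp, hrg⟩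
      have hrg' : (↑r.natAbs : Int) ∣ (Int.gcd k a : Int) := Int.natAbs_dvd.2 hrg
      have hrpN : r.natAbs.Prime := Int.prime_iff_natAbs_prime.1 hrp
      have hrpI : Prime ((r.natAbs : Int)) := Nat.prime_iff_prime_int.mp hrpN
      have hr2 : (2:Int) ≤ r.natAbs := by exact_mod_cast hrpN.two_le
      have hra : (↑r.natAbs : Int) ∣ a := dvd_trans hrg' (Int.gcd_dvd_right k a)
      have hrk : (↑r.natAbs : Int) ∣ k := dvd_trans hrg' (Int.gcd_dvd_left k a)
      exact h _ (primeFactorization_complete a _ (by omega) hrpI hr2 hra) hrk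
    · intro h p hp hpk
      have hs := primeFactorization_sound a p hp
      have hg : Int.gcd k a = 1 := h ha
      have : p ∣ (Int.gcd k a : Int) := Int.dvd_coe_gcd hpk hs.1
      rw [hg] at this
      have := Int.le_of_dvd (by norm_num) this
      omega

theorem pvMark_step (sv : List Bool) (m k : Int) (hm : 0 ≤ m) (hk : 0 ≤ k) :
    PySem.List.pyGetD (PySem.List.pySetD sv m true) k false =
      (PySem.List.pyGetD sv k false || decide (k = m ∧ k < (sv.length : Int))) := by
  rw [PySem.List.pySetD_of_nonneg sv true hm,
      PySem.List.pyGetD_of_nonneg _ false hk, PySem.List.pyGetD_of_nonneg sv false hk]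
  simp only [List.getD_eq_getElem?_getD, List.getElem?_set]
  by_cases h1 : m.toNat = k.toNat
  · by_cases h2 : k.toNat < sv.length
    · have ht : decide (k = m ∧ k < (sv.length : Int)) = true := by
        simp only [decide_eq_true_eq]; omega
      rw [ht, h1, if_pos rfl, if_pos h2]
      simp
    · have hf : decide (k = m ∧ k < (sv.length : Int)) = false := by
        simp only [decide_eq_false_iff_not]; omega
      rw [hf, h1, if_pos rfl, if_neg h2]
      have : sv[k.toNat]? = none := by
        rw [List.getElem?_eq_none_iff]; omega
      simp [this]
  · have hf : decide (k = m ∧ k < (sv.length : Int)) = false := by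
      simp only [decide_eq_false_iff_not]
      intro hcon; omega
    rw [hf, if_neg (fun he => h1 (by omega))]
    simp

theorem pvMark_inner (l : List Int) (sv : List Bool) (k : Int)
    (hl : ∀ m ∈ l, 0 ≤ m) (hk : 0 ≤ k) :
    PySem.List.pyGetD (l.foldl (fun sv m => PySem.List.pySetD sv m true) sv) k false =
      (PySem.List.pyGetD sv k false || decide (k ∈ l ∧ k < (sv.length : Int))) := by
  induction l generalizing sv with
  | nil => simp
  | cons m l ih =>
    simp only [List.foldl_cons]
    rw [ih _ (fun m hm => hl m (List.mem_cons_of_mem _ hm)),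
        PySem.List.length_pySetD,
        pvMark_step sv m k (hl m (List.mem_cons_self)) hk]
    rw [Bool.or_assoc]
    congr 1
    by_cases h1 : k < (sv.length : Int)
    · by_cases h2 : k = m
      · have t1 : decide (k = m ∧ k < (sv.length : Int)) = true := by
          simp only [decide_eq_true_eq]; exact ⟨h2, h1⟩
        have t2 : decide (k ∈ m :: l ∧ k < (sv.length : Int)) = true := by
          simp only [decide_eq_true_eq, List.mem_cons]; exact ⟨Or.inl h2, h1⟩
        rw [t1, t2, Bool.true_or]
      · have t1 : decide (k = m ∧ k < (sv.length : Int)) = false := by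
          simp only [decide_eq_false_iff_not]; tauto
        have t2 : decide (k ∈ m :: l ∧ k < (sv.length : Int)) =
            decide (k ∈ l ∧ k < (sv.length : Int)) := by
          simp only [List.mem_cons]
          by_cases h3 : k ∈ l
          · simp [h3, h1]
          · simp [h2, h3]
        rw [t1, t2, Bool.false_or]
    · have t1 : decide (k = m ∧ k < (sv.length : Int)) = false := by
        simp only [decide_eq_false_iff_not]; tauto
      have t2 : decide (k ∈ m :: l ∧ k < (sv.length : Int)) = false := by
        simp only [decide_eq_false_iff_not]; tauto
      have t3 : decide (k ∈ l ∧ k < (sv.length : Int)) = false := by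
        simp only [decide_eq_false_iff_not]; tauto
      rw [t1, t2, t3, Bool.false_or]

theorem pvMark_len (l : List Int) (sv : List Bool) :
    (l.foldl (fun sv m => PySem.List.pySetD sv m true) sv).length = sv.length := by
  induction l generalizing sv with
  | nil => rfl
  | cons m l ih => simp only [List.foldl_cons]; rw [ih, PySem.List.length_pySetD]

theorem pvMark_outer (ps : List Int) (sv : List Bool) (M k : Int)
    (hp : ∀ p ∈ ps, 2 ≤ p) (hk : 1 ≤ k) (hkM : k ≤ M) (hlen : (sv.length : Int) = M + 1) :
    PySem.List.pyGetD
        (ps.foldl (fun sv p =>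
          (PySem.List.pyRange p (M + 1) p).foldl
            (fun sv m => PySem.List.pySetD sv m true) sv) sv) k false =
      (PySem.List.pyGetD sv k false || decide (∃ p ∈ ps, p ∣ k)) := by
  induction ps generalizing sv with
  | nil => simp
  | cons p ps ih =>
    have hp2 : (2:Int) ≤ p := hp p (List.mem_cons_self)
    simp only [List.foldl_cons]
    rw [ih _ (fun p hm => hp p (List.mem_cons_of_mem _ hm))
          (by rw [pvMark_len]; exact hlen),
        pvMark_inner _ sv k
          (fun m hm => by
            have := ((PySem.List.mem_pyRange_iff_of_pos (by omega)) m).1 hm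
            omega) (by omega)]
    have hmem : (k ∈ PySem.List.pyRange p (M + 1) p ∧ k < (sv.length : Int)) ↔ p ∣ k := by
      rw [(PySem.List.mem_pyRange_iff_of_pos (by omega)) k]
      constructor
      · rintro ⟨⟨_, _, hdvd⟩, _⟩
        have : p ∣ k - p + p := Dvd.dvd.add hdvd (dvd_refl p)
        simpa using this
      · intro hdvd
        have hpk : p ≤ k := Int.le_of_dvd (by omega) hdvd
        exact ⟨⟨hpk, by omega, by simpa using Dvd.dvd.sub hdvd (dvd_refl p)⟩, by omega⟩
    rw [Bool.or_assoc]
    congr 1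
    by_cases h1 : p ∣ k
    · simp [hmem, h1]
    · by_cases h2 : ∃ q ∈ ps, q ∣ k <;> simp [hmem, h1, h2]

theorem pvPrimes_mem (A : List Int) (q : Int) :
    q ∈ A.foldl (fun s num => PySem.Set.update s (primeFactorization num)) PySem.Set.empty ↔
      ∃ a ∈ A, q ∈ primeFactorization a := by
  suffices h : ∀ s : PySem.Set Int,
      q ∈ A.foldl (fun s num => PySem.Set.update s (primeFactorization num)) s ↔
        q ∈ s ∨ ∃ a ∈ A, q ∈ primeFactorization a by
    rw [h PySem.Set.empty]
    simp [PySem.Set.empty]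
  induction A with
  | nil => simp
  | cons a A ih =>
    intro s
    simp only [List.foldl_cons]
    rw [ih (s.update (primeFactorization a)), PySem.Set.mem_update]
    simp only [List.mem_cons]
    constructor
    · rintro ((hs | hf) | ⟨b, hb, hf⟩)
      · exact Or.inl hs
      · exact Or.inr ⟨a, Or.inl rfl, hf⟩
      · exact Or.inr ⟨b, Or.inr hb, hf⟩
    · rintro (hs | ⟨b, (rfl | hb), hf⟩)
      · exact Or.inl (Or.inl hs)
      · exact Or.inl (Or.inr hf)
      · exact Or.inr ⟨b, hb, hf⟩

theorem pvReplicate_getD (n : Nat) (k : Int) (hk : 0 ≤ k) :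
    PySem.List.pyGetD (List.replicate n false) k false = false := by
  rw [PySem.List.pyGetD_of_nonneg _ false hk]
  simp only [List.getD_eq_getElem?_getD, List.getElem?_replicate]
  split <;> rfl

-- ===== VERDICT (by name: the statement is the Claim_ definition above) =====
theorem find_coprimes_spec : Claim_equal_find_coprimes := by
  intro N M A _
  unfold Spec_find_coprimes find_coprimes find_coprimes_alt
  dsimp only
  apply List.filter_congr
  intro k hkmem
  have hk := (PySem.List.mem_pyRange_one).1 hkmem
  have hk1 : 1 ≤ k := hk.1
  have hkM : k ≤ M := by omega
  have hM0 : 0 ≤ M + 1 := by omega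
  -- the collected set of primes
  set P := A.foldl (fun s num => PySem.Set.update s (primeFactorization num)) PySem.Set.empty
  have hp2 : ∀ p ∈ P, 2 ≤ p := by
    intro p hp
    obtain ⟨a, _, hf⟩ := (pvPrimes_mem A p).1 hp
    exact (primeFactorization_sound a p hf).2
  have hlen : ((List.replicate (M + 1).toNat false).length : Int) = M + 1 := by
    simp [List.length_replicate]
    omega
  rw [pvMark_outer P (List.replicate (M + 1).toNat false) M k hp2 hk1 hkM hlen,
      pvReplicate_getD _ k (by omega), Bool.false_or]
  -- right-hand side: the gcd test over the constraining elements
  have hRHS : ((A.filter (fun a => decide (1 < a))).all (fun a => pvGcd k a == 1)) =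
      decide (∀ a ∈ A, 1 < a → Int.gcd k a = 1) := by
    apply Bool.eq_iff_iff.2
    simp only [List.all_eq_true, List.mem_filter, decide_eq_true_eq, beq_iff_eq]
    constructor
    · intro h a ha h1
      have h2 := h a ⟨ha, h1⟩
      rw [pvGcd_eq_gcd k a (by omega) (by omega)] at h2
      exact_mod_cast h2
    · rintro h a ⟨ha, h1⟩
      rw [pvGcd_eq_gcd k a (by omega) (by omega)]
      exact_mod_cast h a ha h1
  rw [hRHS, ← decide_not]
  apply decide_eq_decide.2
  constructor
  · intro h a haA ha1
    refine (pvCoprime_iff k a hk1).1 ?_ ha1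
    intro p hp hpk
    exact h ⟨p, (pvPrimes_mem A p).2 ⟨a, haA, hp⟩, hpk⟩
  · rintro h ⟨p, hpP, hpk⟩
    obtain ⟨a, haA, hf⟩ := (pvPrimes_mem A p).1 hpP
    exact (pvCoprime_iff k a hk1).2 (fun h1 => h a haA h1) p hf hpk
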